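-- pv_equiv track=rewrite | github.com/a-cpp-coder/Go_Straight | demo_test.py | solution
-- ===== SOURCE A (Python) =====
-- def solution(A):
--     # Implement your solution here
--     A.sort()
--     temp = A[0]
--     for i in A[1:]:
--         if temp == i:
--             continue
--         else:
--             if temp == i - 1:
--                 temp += 1
--                 continue
--             else:
--                 break
--
--     temp += 1
--     result = temp if temp > 0 else 1
--     return result
-- ===== SOURCE B (Python) =====
-- def solution(A):
--     # Hash-set walk (no sorting): start at min(A), climb while the successor is present.
--     # (Unlike A, does not sort/mutate A in place; return value is identical.)
--     s = set(A)
--     temp = min(s)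
--     while temp + 1 in s:
--         temp += 1
--     result = temp + 1
--     return result if result > 0 else 1
-- ===== Notes on version B (the rewrite author's own statement) =====
-- stated objective: alternative
-- what changed: Replaces sort-then-scan-with-break by a hash-set walk from min(A) climbing while temp+1 is in the set.
import Mathlib
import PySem

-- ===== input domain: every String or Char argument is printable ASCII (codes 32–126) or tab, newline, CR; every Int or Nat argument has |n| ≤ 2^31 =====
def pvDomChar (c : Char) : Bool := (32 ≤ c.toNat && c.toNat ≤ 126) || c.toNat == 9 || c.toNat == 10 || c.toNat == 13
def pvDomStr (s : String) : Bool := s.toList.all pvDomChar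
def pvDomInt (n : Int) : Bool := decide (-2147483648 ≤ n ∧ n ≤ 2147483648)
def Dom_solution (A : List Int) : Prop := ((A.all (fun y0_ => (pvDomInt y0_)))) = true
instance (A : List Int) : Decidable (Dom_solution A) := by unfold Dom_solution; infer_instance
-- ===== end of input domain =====

-- B replaces A's sort-and-scan by a hash-set walk from min(A) (a different algorithm, similar cost);
-- A sorts its argument in place, B does not — the equivalence proved is about the return value only.

-- ===== PORT A =====
-- A's for-loop over A[1:] with continue/break, state = temp; 'break' = returning temp immediately.
def solutionLoopA : Int → List Int → Int
  | temp, [] => temp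
  | temp, i :: rest =>
    if temp = i then solutionLoopA temp rest
    else if temp = i - 1 then solutionLoopA (temp + 1) rest
    else temp

def solution (A : List Int) : Int :=
  let s := PySem.List.sorted A (fun x => x) false   -- A.sort()
  let temp0 := (PySem.List.pyGet? s 0).getD 0       -- A[0]; IndexError on [] excluded by Pre_
  let temp := solutionLoopA temp0 (PySem.List.slice s (some 1) none)  -- for i in A[1:]
  let temp1 := temp + 1
  if temp1 > 0 then temp1 else 1

-- ===== PORT B =====
-- Source B's while-loop 'while temp+1 in s: temp += 1', made total with fuel = len(A)
-- (the walk consumes distinct elements of s ⊆ A, so it takes < len(A) steps; the fuel is never the reason it stops).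
def solutionWalkB (s : PySem.Set Int) : Nat → Int → Int
  | 0, temp => temp
  | fuel + 1, temp => if PySem.Set.contains s (temp + 1) then solutionWalkB s fuel (temp + 1) else temp

def solution_alt (A : List Int) : Int :=
  let s := PySem.Set.ofList A
  let temp0 := (PySem.List.min? s (fun x => x)).getD 0  -- min(s); ValueError on [] excluded by Pre_
  let temp := solutionWalkB s A.length temp0
  let result := temp + 1
  if result > 0 then result else 1

-- ===== PRECONDITION & SPEC =====
-- Pre_ excludes only the empty list, on which A raises IndexError (and B raises ValueError).
def Pre_solution (A : List Int) : Prop := A ≠ []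
instance (A : List Int) : Decidable (Pre_solution A) := by unfold Pre_solution; infer_instance
def pvWitness_solution : List Int := [3, 1, 2, 5]

def Spec_solution (A : List Int) (out : Int) : Prop := out = solution_alt A
instance (A : List Int) (out : Int) : Decidable (Spec_solution A out) := by unfold Spec_solution; infer_instance

-- ===== CLAIM (what is proved, stated in full; the proofs are below) =====
def Claim_equal_solution : Prop := ∀ (A : List Int), Dom_solution A → Pre_solution A → Spec_solution A (solution A)

-- ===== LEMMAS AND PROOFS =====

/-- Core correspondence: on a sorted run, A's scan-with-break equals B's set walk,
provided membership of values above `temp` in the set agrees with membership in the remaining list,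
and the fuel dominates the list length. -/
theorem walk_eq_loop (s : PySem.Set Int) :
    ∀ (l : List Int) (temp : Int) (fuel : Nat),
      List.Pairwise (· ≤ ·) (temp :: l) →
      (∀ t : Int, temp < t → (t ∈ s ↔ t ∈ l)) →
      l.length ≤ fuel →
      solutionWalkB s fuel temp = solutionLoopA temp l := by
  intro l
  induction l with
  | nil =>
    intro temp fuel _ hmem _
    cases fuel with
    | zero => rfl
    | succ f =>
      have : ¬ (temp + 1 ∈ s) := by
        intro h
        exact absurd ((hmem (temp + 1) (by omega)).mp h) (List.not_mem_nil)
      simp [solutionWalkB, solutionLoopA, this]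
  | cons i rest ih =>
    intro temp fuel hsort hmem hfuel
    have hle : temp ≤ i := (List.pairwise_cons.mp hsort).1 i (by simp)
    have hsort' : List.Pairwise (· ≤ ·) (i :: rest) := (List.pairwise_cons.mp hsort).2
    by_cases heq : temp = i
    · -- duplicate of temp: skipped by A's loop; invisible to the walk (t > temp ⇒ t ≠ i)
      have hmem' : ∀ t : Int, temp < t → (t ∈ s ↔ t ∈ rest) := by
        intro t ht
        rw [hmem t ht]
        constructor
        · intro h; rcases List.mem_cons.mp h with h | h
          · omega
          · exact h
        · exact fun h => List.mem_cons_of_mem _ h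
      have hsort'' : List.Pairwise (· ≤ ·) (temp :: rest) := by
        subst heq; exact hsort'
      rw [show solutionLoopA temp (i :: rest) = solutionLoopA temp rest by
            simp [solutionLoopA, heq]]
      exact ih temp fuel hsort'' hmem' (by simp at hfuel ⊢; omega)
    · by_cases hsucc : temp = i - 1
      · -- i = temp + 1: A increments; B's walk finds temp+1 in the set and steps
        have hi : i = temp + 1 := by omega
        have hin : temp + 1 ∈ s := (hmem (temp + 1) (by omega)).mpr (by simp [← hi])
        cases fuel with
        | zero => simp at hfuel
        | succ f =>
          rw [show solutionWalkB s (f + 1) temp = solutionWalkB s f (temp + 1) by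
                simp [solutionWalkB, hin]]
          rw [show solutionLoopA temp (i :: rest) = solutionLoopA (temp + 1) rest by
                simp [solutionLoopA, hsucc]]
          have hsort'' : List.Pairwise (· ≤ ·) ((temp + 1) :: rest) := by
            rw [← hi]; exact hsort'
          have hmem' : ∀ t : Int, temp + 1 < t → (t ∈ s ↔ t ∈ rest) := by
            intro t ht
            rw [hmem t (by omega)]
            constructor
            · intro h; rcases List.mem_cons.mp h with h | h
              · omega
              · exact h
            · exact fun h => List.mem_cons_of_mem _ h
          exact ih (temp + 1) f hsort'' hmem' (by simp at hfuel; omega)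
      · -- gap: i > temp + 1, A breaks; temp+1 is in neither the list nor the set
        have hgap : temp + 1 < i := by omega
        have hnot : ¬ (temp + 1 ∈ s) := by
          intro h
          rcases List.mem_cons.mp ((hmem (temp + 1) (by omega)).mp h) with h' | h'
          · omega
          · have := (List.pairwise_cons.mp hsort').1 _ h'
            omega
        rw [show solutionLoopA temp (i :: rest) = temp by simp [solutionLoopA, heq, hsucc]]
        cases fuel with
        | zero => rfl
        | succ f => simp [solutionWalkB, hnot]

/-- min? of set(A) is the head of sorted(A). -/
theorem min_set_eq_sorted_head (A : List Int) (h : Int) (t : List Int)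
    (hs : PySem.List.sorted A (fun x => x) false = h :: t) :
    PySem.List.min? (PySem.Set.ofList A) (fun x => x) = some h := by
  have hperm : (PySem.List.sorted A (fun x => x) false).Perm A := PySem.List.sorted_perm A _ _
  have hpw := PySem.List.sorted_pairwise A (fun x => x)
  rw [hs] at hperm hpw
  have hAmem : ∀ y ∈ A, h ≤ y := by
    intro y hy
    rcases List.mem_cons.mp (hperm.mem_iff.mpr hy) with h' | h'
    · omega
    · exact (List.pairwise_cons.mp hpw).1 y h'
  cases hm : PySem.List.min? (PySem.Set.ofList A) (fun x => x) with
  | none =>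
    rw [PySem.List.min?_eq_none_iff] at hm
    have : h ∈ PySem.Set.ofList A := by
      rw [PySem.Set.mem_ofList]
      exact hperm.mem_iff.mp (by simp)
    simp [hm] at this
  | some m =>
    have hmA : m ∈ A := (PySem.Set.mem_ofList A m).mp (PySem.List.min?_mem hm)
    have h1 : h ≤ m := hAmem m hmA
    have h2 : m ≤ h := PySem.List.min?_isMin hm h
      ((PySem.Set.mem_ofList A h).mpr (hperm.mem_iff.mp (by simp)))
    have : m = h := le_antisymm h2 h1
    rw [this]

-- ===== VERDICT (by name: the statement is the Claim_ definition above) =====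
theorem solution_spec : Claim_equal_solution := by
  intro A _ hpre
  unfold Spec_solution solution solution_alt
  obtain ⟨h, t, hs⟩ : ∃ h t, PySem.List.sorted A (fun x => x) false = h :: t := by
    cases hsl : PySem.List.sorted A (fun x => x) false with
    | nil => exact absurd ((PySem.List.sorted_eq_nil_iff A _ _).mp hsl) hpre
    | cons h t => exact ⟨h, t, rfl⟩
  have hperm : (h :: t).Perm A := by rw [← hs]; exact PySem.List.sorted_perm A _ _
  have hpw : List.Pairwise (· ≤ ·) (h :: t) := by
    have := PySem.List.sorted_pairwise A (fun x => x); rwa [hs] at this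
  have hmem : ∀ x : Int, h < x → (x ∈ PySem.Set.ofList A ↔ x ∈ t) := by
    intro x hx
    rw [PySem.Set.mem_ofList, ← hperm.mem_iff]
    constructor
    · intro hc; rcases List.mem_cons.mp hc with h' | h'
      · omega
      · exact h'
    · exact fun h' => List.mem_cons_of_mem _ h'
  have hlen : t.length ≤ A.length := by
    have := hperm.length_eq; simp at this; omega
  have hwalk := walk_eq_loop (PySem.Set.ofList A) t h A.length hpw hmem hlen
  have e1 : (PySem.List.pyGet? (h :: t) 0).getD 0 = h := by simp [pysem]
  have e2 : PySem.List.slice (h :: t) (some 1) none = t := by simp [pysem]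
  simp only [hs, e1, e2, min_set_eq_sorted_head A h t hs, Option.getD_some, hwalk]
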